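-- pv_equiv track=rewrite | github.com/shirleyammerlaan/bdata | Function.py | functiecode_maken
-- ===== SOURCE A (Python) =====
-- def functiecode_maken(genen, lines, alle_functies):
--     #Maakt per gen een lijst met alle functies die het geen heeft, dit zet die in een dict met de gennaam.
--     #Vervolgens wordt de in de dictTF als key gennaam en als value list met True en False gemaakt.
--     dictFun = {}
--     for gen in genen:
--         list_function = []
--         for line in lines:
--             if line[0] == gen:
--                 list_function.append(line[7])
--         dictFun[gen] = list_function
--
--     dictTF = {}
--     for gen in dictFun:
--         listTF = []
--         for functie in alle_functies:
--             if functie in dictFun[gen]: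
--                 listTF.append(True)
--             else:
--                 listTF.append(False)
--         dictTF[gen] = listTF
--     return(dictTF)
-- ===== SOURCE B (Python) =====
-- def functiecode_maken(genen, lines, alle_functies):
--     # One pass over lines grouping function codes per gene into sets, then O(1) membership.
--     gene_set = set(genen)
--     funs = {}
--     for line in lines:
--         g = line[0]
--         if g in gene_set:
--             funs.setdefault(g, set()).add(line[7])
--     result = {}
--     for gen in genen:
--         s = funs.get(gen, ())
--         result[gen] = [f in s for f in alle_functies]
--     return result
-- ===== Notes on version B (the rewrite author's own statement) =====
-- stated objective: alternative
-- what changed: A rescans all lines once per gene and then does a linear list-membership test per (gene, function); B makes one grouping pass over lines into per-gene sets and answers each (gene, function) query with a set lookup (intended as faster; a timing run measured only 1.34x at the largest size both finished, so no speed is claimed).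
-- outside the precondition, e.g. on functiecode_maken([], [[]], []): A returns {}, B raises IndexError
import Mathlib
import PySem

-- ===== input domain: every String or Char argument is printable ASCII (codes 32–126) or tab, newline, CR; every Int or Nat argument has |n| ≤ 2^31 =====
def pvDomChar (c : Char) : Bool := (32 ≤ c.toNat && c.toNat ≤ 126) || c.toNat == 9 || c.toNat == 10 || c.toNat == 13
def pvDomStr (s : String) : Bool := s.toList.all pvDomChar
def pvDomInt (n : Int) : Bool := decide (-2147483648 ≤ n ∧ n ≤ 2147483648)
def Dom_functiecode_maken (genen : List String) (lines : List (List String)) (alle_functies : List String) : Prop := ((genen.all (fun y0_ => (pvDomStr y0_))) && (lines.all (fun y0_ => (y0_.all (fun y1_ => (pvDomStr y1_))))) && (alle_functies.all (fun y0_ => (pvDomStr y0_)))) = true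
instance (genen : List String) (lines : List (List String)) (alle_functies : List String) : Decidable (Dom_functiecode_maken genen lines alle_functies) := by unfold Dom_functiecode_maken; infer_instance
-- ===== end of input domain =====

-- B replaces A's per-gene rescans of `lines` by one grouping pass into per-gene sets and set lookups
-- (objective: alternative; neither version mutates its arguments).

-- ===== PORT A =====
def functiecode_maken (genen : List String) (lines : List (List String)) (alle_functies : List String) : List (String × List Bool) :=
  let dictFun : PySem.Dict String (List String) :=
    genen.foldl (fun d gen =>
      let list_function : List String :=
        lines.foldl (fun lf line =>
          if PySem.List.pyGetD line 0 "" = gen then lf ++ [PySem.List.pyGetD line 7 ""] else lf) []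
      d.insert gen list_function) PySem.Dict.empty
  let dictTF : PySem.Dict String (List Bool) :=
    dictFun.keys.foldl (fun d gen =>
      let listTF : List Bool :=
        alle_functies.foldl (fun lt functie =>
          if (dictFun.getD gen []).contains functie then lt ++ [true] else lt ++ [false]) []
      d.insert gen listTF) PySem.Dict.empty
  dictTF.items

-- ===== PORT B =====
def functiecode_maken_alt (genen : List String) (lines : List (List String)) (alle_functies : List String) : List (String × List Bool) :=
  let gene_set : PySem.Set String := PySem.Set.ofList genen
  -- funs.setdefault(g, set()).add(line[7])  ==  funs[g] = funs.get(g, set()).add(line[7]), i.e. Dict.modify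
  let funs : PySem.Dict String (PySem.Set String) :=
    lines.foldl (fun d line =>
      if gene_set.contains (PySem.List.pyGetD line 0 "") then
        d.modify (PySem.List.pyGetD line 0 "") PySem.Set.empty
          (fun s => s.add (PySem.List.pyGetD line 7 ""))
      else d) PySem.Dict.empty
  let result : PySem.Dict String (List Bool) :=
    genen.foldl (fun r gen =>
      r.insert gen (alle_functies.map (fun f => (funs.getD gen PySem.Set.empty).contains f))) PySem.Dict.empty
  result.items

-- ===== PRECONDITION & SPEC =====
-- Pre_ excludes inputs where some row is empty or a row whose first field is a gene has fewer
-- than 8 fields: there the Python indexing line[0]/line[7] raises IndexError (A only when genen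
-- is nonempty; when genen is empty A returns {} without touching lines, an input excluded here
-- because B's single grouping pass naturally reads line[0] and raises).
def Pre_functiecode_maken (genen : List String) (lines : List (List String)) (alle_functies : List String) : Prop :=
  ∀ l ∈ lines, l ≠ [] ∧ (l.headI ∈ genen → 8 ≤ l.length)
instance (genen : List String) (lines : List (List String)) (alle_functies : List String) : Decidable (Pre_functiecode_maken genen lines alle_functies) := by unfold Pre_functiecode_maken; infer_instance
def pvWitness_functiecode_maken : List String × List (List String) × List String :=
  (["g1", "g2"], [["g1", "x", "x", "x", "x", "x", "x", "f1"]], ["f1", "f2"])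
def Spec_functiecode_maken (genen : List String) (lines : List (List String)) (alle_functies : List String) (out : List (String × List Bool)) : Prop := out = functiecode_maken_alt genen lines alle_functies
instance (genen : List String) (lines : List (List String)) (alle_functies : List String) (out : List (String × List Bool)) : Decidable (Spec_functiecode_maken genen lines alle_functies out) := by unfold Spec_functiecode_maken; infer_instance

-- ===== CLAIM (what is proved, stated in full; the proofs are below) =====
def Claim_equal_functiecode_maken : Prop := ∀ (genen : List String) (lines : List (List String)) (alle_functies : List String), Dom_functiecode_maken genen lines alle_functies → Pre_functiecode_maken genen lines alle_functies → Spec_functiecode_maken genen lines alle_functies (functiecode_maken genen lines alle_functies)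

-- ===== LEMMAS AND PROOFS =====

-- A's per-gene list of function codes, as a filter/map over the lines.
def pvFuns (lines : List (List String)) (g : String) : List String :=
  (lines.filter (fun l => decide (PySem.List.pyGetD l 0 "" = g))).map (fun l => PySem.List.pyGetD l 7 "")

-- a fold inserting a value that depends only on the key: lookup is pointwise
theorem getD_foldl_insert_pure {κ ν : Type} [BEq κ] [LawfulBEq κ] [DecidableEq κ]
    (V : κ → ν) (l : List κ) (d : PySem.Dict κ ν) (g : κ) (dflt : ν) :
    (l.foldl (fun d k => d.insert k (V k)) d).getD g dflt
      = if g ∈ l then V g else d.getD g dflt := by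
  induction l generalizing d with
  | nil => simp
  | cons a t ih =>
      simp only [List.foldl_cons, ih, PySem.Dict.getD_insert, List.mem_cons]
      by_cases ht : g ∈ t <;> by_cases ha : g = a <;> simp [ht, ha]

-- the grouping pass of B: membership in the per-gene set is membership in A's per-gene list
theorem mem_getD_group (gs : PySem.Set String) (lines : List (List String))
    (d : PySem.Dict String (PySem.Set String)) (g : String) (hg : g ∈ gs) (y : String) :
    (y ∈ (lines.foldl (fun d line =>
        if gs.contains (PySem.List.pyGetD line 0 "") then
          d.modify (PySem.List.pyGetD line 0 "") PySem.Set.empty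
            (fun s => s.add (PySem.List.pyGetD line 7 ""))
        else d) d).getD g PySem.Set.empty)
      ↔ (y ∈ d.getD g PySem.Set.empty ∨ y ∈ pvFuns lines g) := by
  induction lines generalizing d with
  | nil => simp [pvFuns]
  | cons line ls ih =>
      simp only [List.foldl_cons]
      by_cases hc : gs.contains (PySem.List.pyGetD line 0 "") = true
      · simp only [hc, if_pos]
        rw [ih]
        by_cases hk : PySem.List.pyGetD line 0 "" = g
        · simp [pvFuns, hk, PySem.Set.mem_add]
          tauto
        · simp [pvFuns, hk, PySem.Dict.getD_modify, Ne.symm hk]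
      · simp only [hc]
        rw [if_neg (by simp_all), ih]
        have hk : PySem.List.pyGetD line 0 "" ≠ g := by
          intro h; rw [h, PySem.Set.contains_iff] at hc; exact hc hg
        simp [pvFuns, hk]

-- A's inner True/False loop is a map of the membership test
theorem foldl_if_bool_append {α : Type} (p : α → Bool) (l : List α) (acc : List Bool) :
    l.foldl (fun lt x => if p x then lt ++ [true] else lt ++ [false]) acc = acc ++ l.map p := by
  have h : ∀ (lt : List Bool), ∀ x ∈ l,
      (if p x then lt ++ [true] else lt ++ [false]) = lt ++ [p x] := by
    intro lt x _; cases hx : p x <;> simp_all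
  rw [PySem.List.foldl_congr_mem l _ _ acc h, PySem.List.foldl_append_singleton_eq_map]

theorem functiecode_maken_eq_alt (genen : List String) (lines : List (List String))
    (alle_functies : List String) :
    functiecode_maken genen lines alle_functies = functiecode_maken_alt genen lines alle_functies := by
  unfold functiecode_maken functiecode_maken_alt
  simp only [PySem.List.foldl_append_ite (p := fun l => PySem.List.pyGetD l 0 "" = _)
      (f := fun l => PySem.List.pyGetD l 7 ""), List.nil_append]
  rw [PySem.Dict.items_eq_map_keys _
        (PySem.Dict.nodup_keys_foldl_insert _ _ _ (by simp)) ([] : List Bool),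
      PySem.Dict.items_eq_map_keys _
        (PySem.Dict.nodup_keys_foldl_insert _ _ _ (by simp)) ([] : List Bool)]
  rw [PySem.Dict.keys_foldl_insert, PySem.Dict.keys_foldl_insert, PySem.Dict.keys_foldl_insert]
  simp only [PySem.Dict.keys_empty, PySem.Set.update_nil_left, PySem.Set.ofList_ofList]
  apply List.map_congr_left
  intro k hk
  have hkg : k ∈ genen := (PySem.Set.mem_ofList genen k).1 hk
  rw [getD_foldl_insert_pure, getD_foldl_insert_pure, if_pos hk, if_pos hkg]
  congr 1
  rw [getD_foldl_insert_pure, if_pos hkg, foldl_if_bool_append, List.nil_append]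
  apply List.map_congr_left
  intro f _
  have hmem : (f ∈ (lines.foldl (fun d line =>
        if (PySem.Set.ofList genen).contains (PySem.List.pyGetD line 0 "") then
          d.modify (PySem.List.pyGetD line 0 "") PySem.Set.empty
            (fun s => s.add (PySem.List.pyGetD line 7 ""))
        else d) PySem.Dict.empty).getD k PySem.Set.empty)
      ↔ f ∈ pvFuns lines k := by
    rw [mem_getD_group _ _ _ _ ((PySem.Set.mem_ofList genen k).2 hkg)]
    simp
  have h1 := PySem.Set.contains_iff ((lines.foldl (fun d line =>
        if (PySem.Set.ofList genen).contains (PySem.List.pyGetD line 0 "") then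
          d.modify (PySem.List.pyGetD line 0 "") PySem.Set.empty
            (fun s => s.add (PySem.List.pyGetD line 7 ""))
        else d) PySem.Dict.empty).getD k PySem.Set.empty) f
  by_cases hf : f ∈ pvFuns lines k
  · simp only [pvFuns] at hf
    rw [List.contains_iff_mem.2 (by simpa [pvFuns] using hf), eq_comm, h1, hmem]
    exact hf
  · rw [Bool.eq_iff_iff, h1, hmem]
    simp only [pvFuns] at hf ⊢
    simp [hf]

-- ===== VERDICT (by name: the statement is the Claim_ definition above) =====
theorem functiecode_maken_spec : Claim_equal_functiecode_maken := by
  intro genen lines alle_functies _ _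
  unfold Spec_functiecode_maken
  exact functiecode_maken_eq_alt genen lines alle_functies
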